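-- pv_equiv track=rewrite | github.com/keb-web/comic-splitter | app/comic_splitter/panel_detector.py | get_indexed_panels
-- ===== SOURCE A (Python) =====
-- from collections import defaultdict
--
-- def get_indexed_panels(panel_rects: list[tuple]) -> list[tuple]:
--     # TODO: integrate variance handling
--     # only works if panels are exactly lined up by y: make it at a range
--
--     indexed_panels = []
--     panels_by_y = defaultdict(list)
--     for panel in panel_rects:
--         panel_height = panel[1]
--         panels_by_y[panel_height].append(panel)
--     for panels in panels_by_y.values():
--         panels_by_x = sorted(panels, key= lambda x: x[0])
--         for x_panel in panels_by_x:
--             indexed_panels.insert(0, x_panel)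
--     return indexed_panels
-- ===== SOURCE B (Python) =====
-- def get_indexed_panels(panel_rects: list[tuple]) -> list[tuple]:
--     order = {}
--     for p in panel_rects:
--         order.setdefault(p[1], len(order))
--     s = sorted(panel_rects, key=lambda p: (order[p[1]], p[0]))
--     s.reverse()
--     return s
-- ===== Notes on version B (the rewrite author's own statement) =====
-- stated objective: simpler
-- what changed: A's defaultdict bucketing plus a per-bucket sort and repeated insert(0) is replaced by a first-appearance rank table (setdefault) and ONE stable global sort by the key (rank, x) followed by a single reverse; stability makes this return exactly A's order.
import Mathlib
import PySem

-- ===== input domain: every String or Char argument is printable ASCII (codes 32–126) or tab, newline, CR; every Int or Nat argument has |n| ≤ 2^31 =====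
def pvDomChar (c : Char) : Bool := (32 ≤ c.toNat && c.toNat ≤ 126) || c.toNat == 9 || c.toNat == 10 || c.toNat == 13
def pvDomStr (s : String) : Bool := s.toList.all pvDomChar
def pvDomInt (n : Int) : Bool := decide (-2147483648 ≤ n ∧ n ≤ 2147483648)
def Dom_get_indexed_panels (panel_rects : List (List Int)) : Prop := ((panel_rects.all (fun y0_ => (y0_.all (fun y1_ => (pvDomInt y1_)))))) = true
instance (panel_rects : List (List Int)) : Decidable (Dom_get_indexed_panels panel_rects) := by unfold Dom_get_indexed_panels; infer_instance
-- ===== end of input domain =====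

-- B replaces A's defaultdict bucketing + per-bucket sort + insert(0) loop by a first-appearance
-- rank table and ONE stable global sort by (rank, x) followed by a reverse (objective: simpler).

-- ===== PORT A =====
-- panel[1] / panel[0]; the total pyGetD forms are exact under Pre_ (every panel has length ≥ 2)
def pvY (p : List Int) : Int := PySem.List.pyGetD p 1 0
def pvX (p : List Int) : Int := PySem.List.pyGetD p 0 0

def get_indexed_panels (panel_rects : List (List Int)) : List (List Int) :=
  let panels_by_y : PySem.Dict Int (List (List Int)) :=
    panel_rects.foldl (fun d panel => d.modify (pvY panel) [] (fun l => l ++ [panel])) PySem.Dict.empty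
  panels_by_y.values.foldl (fun indexed panels =>
    (PySem.List.sorted panels (fun x => pvX x)).foldl
      (fun acc xp => PySem.List.insert acc 0 xp) indexed) []

-- ===== PORT B =====
def get_indexed_panels_alt (panel_rects : List (List Int)) : List (List Int) :=
  let order : PySem.Dict Int Int :=
    panel_rects.foldl (fun d p => d.setdefault (pvY p) (d.size : Int)) PySem.Dict.empty
  (PySem.List.sorted2 panel_rects (fun p => order.getD (pvY p) 0) (fun p => pvX p)).reverse

-- ===== PRECONDITION & SPEC =====
-- Pre_ excludes exactly the inputs on which Python A raises IndexError (a panel with fewer than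
-- two coordinates: A reads panel[1] and panel[0]); B raises there as well.
def Pre_get_indexed_panels (panel_rects : List (List Int)) : Prop :=
  ∀ p ∈ panel_rects, 2 ≤ p.length
instance (panel_rects : List (List Int)) : Decidable (Pre_get_indexed_panels panel_rects) := by
  unfold Pre_get_indexed_panels; infer_instance
def pvWitness_get_indexed_panels : List (List Int) := [[1, 2], [3, 2], [0, 5], [2, 2]]

def Spec_get_indexed_panels (panel_rects : List (List Int)) (out : List (List Int)) : Prop := out = get_indexed_panels_alt panel_rects
instance (panel_rects : List (List Int)) (out : List (List Int)) : Decidable (Spec_get_indexed_panels panel_rects out) := by unfold Spec_get_indexed_panels; infer_instance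

-- ===== CLAIM (what is proved, stated in full; the proofs are below) =====
def Claim_equal_get_indexed_panels : Prop := ∀ (panel_rects : List (List Int)), Dom_get_indexed_panels panel_rects → Pre_get_indexed_panels panel_rects → Spec_get_indexed_panels panel_rects (get_indexed_panels panel_rects)

-- ===== LEMMAS AND PROOFS =====

-- Shared proof vocabulary: distinct y-values in first-appearance order, y-groups, x-sorted blocks.
def yKeys (xs : List (List Int)) : List Int := PySem.Set.ofList (xs.map pvY)
def grp (xs : List (List Int)) (c : Int) : List (List Int) := xs.filter (fun p => pvY p == c)
def sortX (g : List (List Int)) : List (List Int) := PySem.List.sorted g (fun x => pvX x)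
-- the lexicographic "comes strictly before" test of Python's stable sort by key (rank, x)
def bfor (k1 : List Int → Int) (a b : List Int) : Bool :=
  decide (k1 a < k1 b) || (!decide (k1 b < k1 a) && decide (pvX a < pvX b))

lemma yKeys_append_singleton (xs : List (List Int)) (p : List Int) :
    yKeys (xs ++ [p]) = PySem.Set.add (yKeys xs) (pvY p) := by
  simp [yKeys, PySem.Set.ofList_eq_foldl, List.foldl_append]

lemma nodup_yKeys (xs : List (List Int)) : (yKeys xs).Nodup := PySem.Set.nodup_ofList _

lemma grp_append_singleton (xs : List (List Int)) (p : List Int) (c : Int) :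
    grp (xs ++ [p]) c = grp xs c ++ (if pvY p == c then [p] else []) := by
  simp only [grp, List.filter_append, List.filter]
  split <;> simp_all

lemma mem_sortX_grp (xs : List (List Int)) (c' : Int) (q : List Int)
    (h : q ∈ sortX (grp xs c')) : pvY q = c' := by
  rw [sortX, PySem.List.mem_sorted] at h
  simpa [grp] using (List.mem_filter.1 h).2

lemma grp_eq_nil_of_not_mem (xs : List (List Int)) (c : Int) (h : c ∉ yKeys xs) :
    grp xs c = [] := by
  rw [grp, List.filter_eq_nil_iff]
  intro q hq hc
  apply h
  have hyq : pvY q = c := by simpa using hc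
  simp only [yKeys, PySem.Set.mem_ofList, List.mem_map]
  exact ⟨q, hq, hyq⟩

lemma nodup_split (K : List Int) (c : Int) (hnd : K.Nodup) (hm : c ∈ K) :
    ∃ K₁ K₂, K = K₁ ++ c :: K₂ ∧ c ∉ K₁ ∧ c ∉ K₂ := by
  obtain ⟨K₁, K₂, rfl⟩ := List.append_of_mem hm
  simp [List.nodup_append] at hnd
  exact ⟨K₁, K₂, rfl, fun hc => (hnd.2.2 c hc).1 rfl, hnd.2.1.1⟩

-- ---- A-side ----
lemma values_panels_by_y (xs : List (List Int)) :
    (xs.foldl (fun d panel => d.modify (pvY panel) [] (fun l => l ++ [panel]))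
      (PySem.Dict.empty : PySem.Dict Int (List (List Int)))).values
    = (yKeys xs).map (fun c => grp xs c) := by
  set D := xs.foldl (fun d panel => d.modify (pvY panel) [] (fun l => l ++ [panel]))
      (PySem.Dict.empty : PySem.Dict Int (List (List Int))) with hD
  have hkeys : D.keys = yKeys xs := by
    rw [hD, PySem.Dict.keys_foldl_modify_key]
    simp [yKeys, PySem.Set.ofList_eq_foldl, PySem.Set.update, PySem.Dict.keys_empty]
  have hnd : D.keys.Nodup := by
    rw [hD]; exact PySem.Dict.nodup_keys_foldl_modify_key _ _ _ _ _ (by simp [PySem.Dict.keys_empty])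
  rw [PySem.Dict.values_eq_map_keys D hnd [], hkeys]
  apply List.map_congr_left
  intro c hc
  have hgd : D.getD c [] = grp xs c := by
    rw [hD]
    rw [show xs.foldl (fun d panel => d.modify (pvY panel) [] (fun l => l ++ [panel]))
          (PySem.Dict.empty : PySem.Dict Int (List (List Int)))
        = (xs.map (fun p : List Int => (pvY p, p))).foldl
            (fun d q => d.modify q.1 [] (fun l => l ++ [q.2])) PySem.Dict.empty from
      (List.foldl_map (f := fun p : List Int => (pvY p, p))
        (g := fun (d : PySem.Dict Int (List (List Int))) q => d.modify q.1 [] (fun l => l ++ [q.2]))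
        (l := xs) (init := PySem.Dict.empty)).symm]
    rw [PySem.Dict.getD_foldl_modify_append]
    simp [grp, List.filter_map, Function.comp_def]
  rw [hgd]

lemma foldl_insert_zero (l acc : List (List Int)) :
    l.foldl (fun acc xp => PySem.List.insert acc 0 xp) acc = l.reverse ++ acc := by
  induction l generalizing acc with
  | nil => simp
  | cons x t ih => simp [PySem.List.insert_zero]

lemma outer_fold (gs : List (List (List Int))) (acc : List (List Int)) :
    gs.foldl (fun indexed panels =>
      (PySem.List.sorted panels (fun x => pvX x)).foldl
        (fun acc xp => PySem.List.insert acc 0 xp) indexed) acc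
    = (gs.map sortX).flatten.reverse ++ acc := by
  induction gs generalizing acc with
  | nil => simp
  | cons g t ih => rw [List.foldl_cons, foldl_insert_zero, ih]; simp [sortX]

lemma portA_eq (xs : List (List Int)) :
    get_indexed_panels xs = ((yKeys xs).map (fun c => sortX (grp xs c))).flatten.reverse := by
  show ((xs.foldl (fun d panel => d.modify (pvY panel) [] (fun l => l ++ [panel]))
      (PySem.Dict.empty : PySem.Dict Int (List (List Int)))).values).foldl _ [] = _
  rw [values_panels_by_y, outer_fold]
  simp [List.map_map, Function.comp_def]

-- ---- B-side: the order dict records first-appearance ranks ----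
def orderD (xs : List (List Int)) : PySem.Dict Int Int :=
  xs.foldl (fun d p => d.setdefault (pvY p) (d.size : Int)) PySem.Dict.empty

lemma orderD_facts (xs : List (List Int)) :
    (orderD xs).keys = yKeys xs ∧
    ∀ c ∈ yKeys xs, (orderD xs).getD c 0 = (((yKeys xs).idxOf c : Nat) : Int) := by
  induction xs using List.reverseRecOn with
  | nil => constructor
           · simp [orderD, yKeys, PySem.Set.ofList_eq_foldl, PySem.Dict.keys_empty]
           · intro c hc; simp [yKeys, PySem.Set.ofList_eq_foldl] at hc
  | append_singleton xs p ih =>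
    obtain ⟨hk, hg⟩ := ih
    have hsz : (orderD xs).size = (yKeys xs).length := by
      have : (orderD xs).keys.length = (yKeys xs).length := by rw [hk]
      simpa [PySem.Dict.keys, PySem.Dict.size] using this
    have hstep : orderD (xs ++ [p]) = (orderD xs).setdefault (pvY p) ((orderD xs).size : Int) := by
      simp [orderD, List.foldl_append]
    by_cases hmem : pvY p ∈ yKeys xs
    · have hcon : (orderD xs).contains (pvY p) = true := by
        rw [PySem.Dict.contains_iff_mem_keys]
        rw [hk]; exact hmem
      have hset : orderD (xs ++ [p]) = orderD xs := by
        rw [hstep, PySem.Dict.setdefault_of_contains _ _ hcon]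
      have hyk : yKeys (xs ++ [p]) = yKeys xs := by
        rw [yKeys_append_singleton]; simp [PySem.Set.add, hmem]
      rw [hset, hyk]; exact ⟨hk, hg⟩
    · have hcon : (orderD xs).contains (pvY p) = false := by
        have h2 := PySem.Dict.contains_iff_mem_keys (orderD xs) (pvY p)
        rw [hk] at h2
        cases hb : (orderD xs).contains (pvY p)
        · rfl
        · exact absurd (h2.1 hb) hmem
      have hset : orderD (xs ++ [p]) = (orderD xs).insert (pvY p) ((orderD xs).size : Int) := by
        rw [hstep, PySem.Dict.setdefault_of_not_contains _ _ hcon]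
      have hyk : yKeys (xs ++ [p]) = yKeys xs ++ [pvY p] := by
        rw [yKeys_append_singleton]; simp [PySem.Set.add, hmem]
      constructor
      · rw [hset, hyk, PySem.Dict.keys_insert_of_not_contains _ _ hcon, hk]
      · intro c hc
        rw [hset, hyk, PySem.Dict.getD_insert]
        by_cases hcp : c = pvY p
        · subst hcp
          simp [List.idxOf_append, hmem, hsz, List.idxOf_cons_self]
        · rw [hyk] at hc
          simp [hcp] at hc
          simp [hcp, List.idxOf_append, hc, hg c hc]

-- ---- insertBy machinery ----
lemma insertBy_congr {α : Type} (before before' : α → α → Bool) (x : α) (ys : List α)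
    (h : ∀ y ∈ ys, before x y = before' x y) :
    PySem.List.insertBy before x ys = PySem.List.insertBy before' x ys := by
  induction ys with
  | nil => rfl
  | cons y t ih =>
    have hy := h y (by simp)
    simp only [PySem.List.insertBy, hy]
    split <;> simp [ih (fun z hz => h z (by simp [hz]))]

lemma foldl_insertBy_congr {α : Type} (before before' : α → α → Bool) (xs acc : List α)
    (h : ∀ a ∈ xs, ∀ b, (b ∈ xs ∨ b ∈ acc) → before a b = before' a b) :
    xs.foldl (fun acc x => PySem.List.insertBy before x acc) acc
      = xs.foldl (fun acc x => PySem.List.insertBy before' x acc) acc := by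
  induction xs generalizing acc with
  | nil => rfl
  | cons x t ih =>
    simp only [List.foldl_cons]
    rw [insertBy_congr before before' x acc (fun y hy => h x (by simp) y (Or.inr hy))]
    apply ih
    intro a ha b hb
    apply h a (by simp [ha])
    rcases hb with hb | hb
    · exact Or.inl (by simp [hb])
    · rcases (PySem.List.mem_insertBy _ _ _ _).1 hb with hb | hb
      · exact Or.inl (by simp [hb])
      · exact Or.inr hb

lemma sorted2_eq_foldl (xs : List (List Int)) (k1 : List Int → Int) :
    PySem.List.sorted2 xs k1 pvX
      = xs.foldl (fun acc x => PySem.List.insertBy (bfor k1) x acc) [] := rfl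

lemma sorted2_append_singleton (xs : List (List Int)) (p : List Int) (k1 : List Int → Int) :
    PySem.List.sorted2 (xs ++ [p]) k1 pvX
      = PySem.List.insertBy (bfor k1) p (PySem.List.sorted2 xs k1 pvX) := by
  rw [sorted2_eq_foldl, sorted2_eq_foldl, List.foldl_append]
  rfl

lemma sorted2_congr (xs : List (List Int)) (k1 k1' : List Int → Int)
    (h : ∀ a ∈ xs, k1 a = k1' a) :
    PySem.List.sorted2 xs k1 pvX = PySem.List.sorted2 xs k1' pvX := by
  rw [sorted2_eq_foldl, sorted2_eq_foldl]
  apply foldl_insertBy_congr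
  intro a ha b hb
  rcases hb with hb | hb
  · simp [bfor, h a ha, h b hb]
  · simp at hb

lemma insertBy_append_front {α : Type} (before : α → α → Bool) (x : α) (A B : List α)
    (hA : ∀ a ∈ A, before x a = false) :
    PySem.List.insertBy before x (A ++ B) = A ++ PySem.List.insertBy before x B := by
  induction A with
  | nil => rfl
  | cons a t ih =>
    have ha := hA a (by simp)
    simp only [List.cons_append, PySem.List.insertBy, ha]
    simp [ih (fun z hz => hA z (by simp [hz]))]

lemma insertBy_append_part {α : Type} (before before' : α → α → Bool) (x : α) (B C : List α)
    (hB : ∀ b ∈ B, before x b = before' x b) (hC : ∀ c ∈ C, before x c = true) :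
    PySem.List.insertBy before x (B ++ C) = PySem.List.insertBy before' x B ++ C := by
  induction B with
  | nil =>
    cases C with
    | nil => rfl
    | cons c t => simp [PySem.List.insertBy, hC c (by simp)]
  | cons b t ih =>
    have hb := hB b (by simp)
    simp only [List.cons_append, PySem.List.insertBy, ← hb]
    split <;> simp [ih (fun z hz => hB z (by simp [hz]))]

lemma sortX_append_singleton (g : List (List Int)) (p : List Int) :
    sortX (g ++ [p]) = PySem.List.insertBy (fun a b => decide (pvX a < pvX b)) p (sortX g) := by
  simp [sortX, PySem.List.sorted_eq_foldl_insertBy, List.foldl_append]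

-- ---- the main stability lemma: one stable sort by (first-appearance rank, x) = concatenated blocks ----
lemma sorted2_rank_eq_blocks (xs : List (List Int)) :
    PySem.List.sorted2 xs (fun q => (((yKeys xs).idxOf (pvY q) : Nat) : Int)) pvX
      = ((yKeys xs).map (fun c => sortX (grp xs c))).flatten := by
  induction xs using List.reverseRecOn with
  | nil => rfl
  | append_singleton xs p ih =>
    by_cases hmem : pvY p ∈ yKeys xs
    · -- the y-value of p was seen before: p is inserted at the end of its block
      have hyk : yKeys (xs ++ [p]) = yKeys xs := by
        rw [yKeys_append_singleton]; simp [PySem.Set.add, hmem]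
      obtain ⟨K₁, K₂, hK, hc1, hc2⟩ := nodup_split _ _ (nodup_yKeys xs) hmem
      have hrc : (yKeys xs).idxOf (pvY p) = K₁.length := by
        rw [hK]; simp [List.idxOf_append, hc1]
      -- rank of any element of a block of K₁ is < |K₁|; of a block of K₂ is > |K₁|
      have hrank1 : ∀ q ∈ (K₁.map (fun c => sortX (grp xs c))).flatten,
          (yKeys xs).idxOf (pvY q) < K₁.length := by
        intro q hq
        simp only [List.mem_flatten, List.mem_map] at hq
        obtain ⟨l, ⟨c'', hc'', rfl⟩, hql⟩ := hq
        rw [mem_sortX_grp xs c'' q hql, hK]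
        simp [List.idxOf_append, hc'']
        exact List.idxOf_lt_length_of_mem hc''
      have hrank2 : ∀ q ∈ (K₂.map (fun c => sortX (grp xs c))).flatten,
          K₁.length < (yKeys xs).idxOf (pvY q) := by
        intro q hq
        simp only [List.mem_flatten, List.mem_map] at hq
        obtain ⟨l, ⟨c'', hc'', rfl⟩, hql⟩ := hq
        have hne : c'' ≠ pvY p := fun h => hc2 (h ▸ hc'')
        have hn1 : c'' ∉ K₁ := fun h => by
          have := (nodup_yKeys xs); rw [hK] at this
          simp [List.nodup_append] at this
          exact (this.2.2 c'' h).2 c'' hc'' rfl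
        rw [mem_sortX_grp xs c'' q hql, hK]
        simp [List.idxOf_append, hn1, hne.symm]
      -- the middle block gets p appended
      have hgrp_eq : ∀ c'' ∈ K₁ ++ K₂, grp (xs ++ [p]) c'' = grp xs c'' := by
        intro c'' hc''
        have hne : pvY p ≠ c'' := by
          intro h; subst h
          rcases List.mem_append.1 hc'' with h | h
          · exact hc1 h
          · exact hc2 h
        rw [grp_append_singleton]
        simp [hne]
      rw [hyk, sorted2_append_singleton, ih, hK]
      simp only [List.map_append, List.map_cons, List.flatten_append, List.flatten_cons]
      rw [← hK]
      rw [insertBy_append_front _ _ _ _ (by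
        intro a ha
        have := hrank1 a ha
        simp only [bfor, hrc]
        have h1 : ¬ ((K₁.length : Int) < ((yKeys xs).idxOf (pvY a) : Nat)) := by omega
        have h2 : (((yKeys xs).idxOf (pvY a) : Nat) : Int) < K₁.length := by omega
        simp [h1, h2])]
      rw [insertBy_append_part (bfor (fun q => (((yKeys xs).idxOf (pvY q) : Nat) : Int)))
            (fun a b => decide (pvX a < pvX b)) p
            (sortX (grp xs (pvY p))) ((K₂.map (fun c => sortX (grp xs c))).flatten)
            (by
              intro b hb
              have hyb : pvY b = pvY p := mem_sortX_grp xs (pvY p) b hb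
              simp [bfor, hyb])
            (by
              intro q hq
              have := hrank2 q hq
              simp only [bfor, hrc]
              have h1 : ((K₁.length : Nat) : Int) < ((yKeys xs).idxOf (pvY q) : Nat) := by omega
              simp [h1])]
      rw [← sortX_append_singleton]
      have hmid : grp xs (pvY p) ++ [p] = grp (xs ++ [p]) (pvY p) := by
        rw [grp_append_singleton]; simp
      rw [hmid]
      have hm1 : K₁.map (fun c => sortX (grp (xs ++ [p]) c)) = K₁.map (fun c => sortX (grp xs c)) :=
        List.map_congr_left (fun c'' h => by rw [hgrp_eq c'' (List.mem_append.2 (Or.inl h))])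
      have hm2 : K₂.map (fun c => sortX (grp (xs ++ [p]) c)) = K₂.map (fun c => sortX (grp xs c)) :=
        List.map_congr_left (fun c'' h => by rw [hgrp_eq c'' (List.mem_append.2 (Or.inr h))])
      rw [hm1, hm2]
    · -- a fresh y-value: p starts a new block at the very end
      have hyk : yKeys (xs ++ [p]) = yKeys xs ++ [pvY p] := by
        rw [yKeys_append_singleton]; simp [PySem.Set.add, hmem]
      have hrp : (yKeys (xs ++ [p])).idxOf (pvY p) = (yKeys xs).length := by
        rw [hyk]; simp [List.idxOf_append, hmem]
      have hragree : ∀ a ∈ xs, (yKeys (xs ++ [p])).idxOf (pvY a) = (yKeys xs).idxOf (pvY a) := by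
        intro a ha
        have : pvY a ∈ yKeys xs := by
          simp only [yKeys, PySem.Set.mem_ofList, List.mem_map]; exact ⟨a, ha, rfl⟩
        rw [hyk]; simp [List.idxOf_append, this]
      rw [sorted2_append_singleton]
      rw [sorted2_congr _ _ (fun q => (((yKeys xs).idxOf (pvY q) : Nat) : Int))
            (fun a ha => by rw [hragree a ha]), ih]
      rw [PySem.List.insertBy_of_forall_not_before _ _ _ (by
        intro q hq
        simp only [List.mem_flatten, List.mem_map] at hq
        obtain ⟨l, ⟨c'', hc'', rfl⟩, hql⟩ := hq
        have hlt : (yKeys (xs ++ [p])).idxOf (pvY q) < (yKeys xs).length := by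
          have hy : pvY q = c'' := mem_sortX_grp xs c'' q hql
          rw [hyk, hy]
          simp [List.idxOf_append, hc'']
          exact List.idxOf_lt_length_of_mem hc''
        simp only [bfor, hrp]
        have h1 : ¬ (((yKeys xs).length : Int) < ((yKeys (xs ++ [p])).idxOf (pvY q) : Nat)) := by
          omega
        have h2 : (((yKeys (xs ++ [p])).idxOf (pvY q) : Nat) : Int) < (yKeys xs).length := by
          omega
        simp [h1, h2])]
      rw [hyk]
      simp only [List.map_append, List.map_cons, List.map_nil, List.flatten_append]
      have hm1 : (yKeys xs).map (fun c => sortX (grp (xs ++ [p]) c))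
          = (yKeys xs).map (fun c => sortX (grp xs c)) :=
        List.map_congr_left (fun c'' h => by
          have hne : pvY p ≠ c'' := fun he => hmem (he ▸ h)
          rw [grp_append_singleton]; simp [hne])
      rw [hm1]
      have hgp : grp (xs ++ [p]) (pvY p) = [p] := by
        rw [grp_append_singleton, grp_eq_nil_of_not_mem xs (pvY p) hmem]; simp
      rw [hgp]
      simp only [List.flatten_cons, List.flatten_nil, List.append_nil]
      rfl

lemma portB_eq (xs : List (List Int)) :
    get_indexed_panels_alt xs = ((yKeys xs).map (fun c => sortX (grp xs c))).flatten.reverse := by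
  show (PySem.List.sorted2 xs (fun p => (orderD xs).getD (pvY p) 0) (fun p => pvX p)).reverse = _
  obtain ⟨-, hg⟩ := orderD_facts xs
  rw [show (fun p : List Int => pvX p) = pvX from rfl]
  rw [sorted2_congr xs _ (fun q => (((yKeys xs).idxOf (pvY q) : Nat) : Int)) (fun a ha => by
    apply hg
    simp only [yKeys, PySem.Set.mem_ofList, List.mem_map]; exact ⟨a, ha, rfl⟩)]
  rw [sorted2_rank_eq_blocks]

-- ===== VERDICT (by name: the statement is the Claim_ definition above) =====
theorem get_indexed_panels_spec : Claim_equal_get_indexed_panels := by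
  intro xs _ _
  unfold Spec_get_indexed_panels
  rw [portA_eq, portB_eq]
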